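-- pv_equiv track=rewrite | github.com/deluxebrain/advent-of-code-2017-python | day_04.py | is_passphrase_valid
-- ===== SOURCE A (Python) =====
-- def is_passphrase_valid(passphrase):
--     """Checks if passphrase is valid by checking for
--     any repeated words."""
--     valid = True
--     words = set()
--     for word in passphrase.split():
--         if word not in words:
--             words.add(word)
--         else:
--             valid = False
--             break
--     return valid
-- ===== SOURCE B (Python) =====
-- def is_passphrase_valid(passphrase):
--     """Checks if passphrase is valid by checking for
--     any repeated words."""
--     words = passphrase.split()
--     return len(words) == len(set(words))
-- ===== Notes on version B (the rewrite author's own statement) =====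
-- stated objective: simpler
-- what changed: Replaced the per-word membership loop with early break by a single bulk comparison len(words) == len(set(words)); no loop, no incremental set maintenance, no short-circuit.
import Mathlib
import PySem

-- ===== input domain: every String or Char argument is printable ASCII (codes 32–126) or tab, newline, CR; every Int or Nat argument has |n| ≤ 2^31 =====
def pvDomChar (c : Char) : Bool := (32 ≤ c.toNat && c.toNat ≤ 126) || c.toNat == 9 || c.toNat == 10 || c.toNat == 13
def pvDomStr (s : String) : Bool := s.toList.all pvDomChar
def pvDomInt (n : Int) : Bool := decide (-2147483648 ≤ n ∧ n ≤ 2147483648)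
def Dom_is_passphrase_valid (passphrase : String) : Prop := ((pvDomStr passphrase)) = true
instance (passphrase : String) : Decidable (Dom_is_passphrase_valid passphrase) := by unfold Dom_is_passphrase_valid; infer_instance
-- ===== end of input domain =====

-- B replaces A's per-word membership loop (with early break) by one bulk count
-- comparison len(words) == len(set(words)) — simpler, no explicit loop.

-- ===== PORT A =====
-- A's for-loop with early break: structural recursion over the word list,
-- carrying the growing 'words' set; 'break' returns false immediately.
def pvLoopA : List String → PySem.Set String → Bool
  | [], _ => true
  | w :: ws, seen =>
      if ¬ PySem.Set.contains seen w then
        pvLoopA ws (PySem.Set.add seen w)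
      else
        false

def is_passphrase_valid (passphrase : String) : Bool :=
  pvLoopA (PySem.Str.split₀ passphrase) PySem.Set.empty

-- ===== PORT B =====
def is_passphrase_valid_alt (passphrase : String) : Bool :=
  let words := PySem.Str.split₀ passphrase
  words.length == (PySem.Set.ofList words).length

-- ===== PRECONDITION & SPEC =====
def Spec_is_passphrase_valid (passphrase : String) (out : Bool) : Prop := out = is_passphrase_valid_alt passphrase
instance (passphrase : String) (out : Bool) : Decidable (Spec_is_passphrase_valid passphrase out) := by unfold Spec_is_passphrase_valid; infer_instance

-- ===== CLAIM (what is proved, stated in full; the proofs are below) =====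
def Claim_equal_is_passphrase_valid : Prop := ∀ (passphrase : String), Dom_is_passphrase_valid passphrase → Spec_is_passphrase_valid passphrase (is_passphrase_valid passphrase)

-- ===== LEMMAS AND PROOFS =====

theorem pvLen_update_le (ws : List String) (seen : PySem.Set String) :
    (PySem.Set.update seen ws).length ≤ seen.length + ws.length := by
  induction ws generalizing seen with
  | nil => simp [PySem.Set.update]
  | cons w ws ih =>
      have h := ih (PySem.Set.add seen w)
      have hadd : (PySem.Set.add seen w).length ≤ seen.length + 1 := by
        simp [PySem.Set.add]
        split <;> simp
      calc (PySem.Set.update seen (w :: ws)).length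
          = (PySem.Set.update (PySem.Set.add seen w) ws).length := by
            simp [PySem.Set.update]
        _ ≤ (PySem.Set.add seen w).length + ws.length := h
        _ ≤ seen.length + 1 + ws.length := by omega
        _ = seen.length + (w :: ws).length := by simp; omega

theorem pvLoopA_eq (ws : List String) (seen : PySem.Set String) :
    pvLoopA ws seen = ((PySem.Set.update seen ws).length == seen.length + ws.length) := by
  induction ws generalizing seen with
  | nil => simp [pvLoopA, PySem.Set.update]
  | cons w ws ih =>
      by_cases hc : PySem.Set.contains seen w
      · have hw : w ∈ seen := by
          simpa [PySem.Set.contains_iff] using hc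
        have hadd : PySem.Set.add seen w = seen := by
          simp [PySem.Set.add, hw]
        have hle : (PySem.Set.update seen ws).length ≤ seen.length + ws.length :=
          pvLen_update_le ws seen
        have hlen : (PySem.Set.update seen (w :: ws)).length = (PySem.Set.update seen ws).length := by
          simp [PySem.Set.update, hadd]
        rw [show pvLoopA (w :: ws) seen = false from by
          simp only [pvLoopA]; rw [if_neg]; simp [hw], hlen]
        symm
        rw [beq_eq_false_iff_ne]
        simp only [List.length_cons]
        omega
      · have hw : w ∉ seen := by
          simpa [PySem.Set.contains_iff] using hc
        have hadd : (PySem.Set.add seen w).length = seen.length + 1 := by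
          simp [PySem.Set.add, hw]
        have hstep : PySem.Set.update seen (w :: ws) = PySem.Set.update (PySem.Set.add seen w) ws := by
          simp [PySem.Set.update]
        rw [pvLoopA, if_pos (by simpa using hc), ih, hstep]
        simp [hadd]
        constructor <;> intro h <;> omega

-- ===== VERDICT (by name: the statement is the Claim_ definition above) =====
theorem is_passphrase_valid_spec : Claim_equal_is_passphrase_valid := by
  intro passphrase _
  unfold Spec_is_passphrase_valid is_passphrase_valid is_passphrase_valid_alt
  rw [pvLoopA_eq]
  have : PySem.Set.update PySem.Set.empty (PySem.Str.split₀ passphrase)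
      = PySem.Set.ofList (PySem.Str.split₀ passphrase) := by
    simp [PySem.Set.update_nil_left]
  rw [this]
  simp only [PySem.Set.empty, List.length_nil, Nat.zero_add]
  by_cases h : (PySem.Str.split₀ passphrase).length
      = (PySem.Set.ofList (PySem.Str.split₀ passphrase)).length
  · simp [h]
  · simp [h, Ne.symm h]
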